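-- pv_equiv track=rewrite | github.com/Vatraz/dot-to-dot | image_processing/split_number.py | split_br
-- ===== SOURCE A (Python) =====
-- def split_br(bounding_rect, splits):
--     x, y, w, h = bounding_rect
--     n_br = len(splits) + 1
--     edges = [x] + [split+x for split in splits] + [x+w]
--
--     br_list = []
--     for i in range(n_br):
--         br = (edges[i], y, edges[i+1] - edges[i], h)
--         br_list.append(br)
--
--     return br_list
-- ===== SOURCE B (Python) =====
-- def split_br(bounding_rect, splits):
--     x, y, w, h = bounding_rect
--     prev = x
--     br_list = []
--     for split in splits:
--         edge = split + x
--         br_list.append((prev, y, edge - prev, h))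
--         prev = edge
--     br_list.append((prev, y, x + w - prev, h))
--     return br_list
-- ===== Notes on version B (the rewrite author's own statement) =====
-- stated objective: simpler
-- what changed: Drops the precomputed edges list and the index loop over range(n_br); instead threads a running previous-edge accumulator through a single loop over splits and appends the final rect after the loop.
import Mathlib
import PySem

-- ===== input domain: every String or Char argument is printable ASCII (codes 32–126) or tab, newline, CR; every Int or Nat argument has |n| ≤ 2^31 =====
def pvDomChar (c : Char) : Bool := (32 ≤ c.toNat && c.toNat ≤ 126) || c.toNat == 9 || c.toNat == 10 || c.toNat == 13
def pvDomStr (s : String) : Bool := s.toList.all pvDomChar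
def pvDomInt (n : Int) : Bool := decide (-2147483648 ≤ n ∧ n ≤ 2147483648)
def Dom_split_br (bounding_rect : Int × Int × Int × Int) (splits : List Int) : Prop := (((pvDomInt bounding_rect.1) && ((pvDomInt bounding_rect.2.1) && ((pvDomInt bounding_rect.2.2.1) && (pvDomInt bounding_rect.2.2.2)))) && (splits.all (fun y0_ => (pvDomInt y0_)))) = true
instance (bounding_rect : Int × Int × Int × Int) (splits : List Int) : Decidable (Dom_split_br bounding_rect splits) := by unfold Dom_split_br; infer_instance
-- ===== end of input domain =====

-- B replaces A's precomputed edges table + index loop with a single running previous-edge accumulator (objective: simpler).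
-- ===== PORT A =====
-- the loop body: A indexes edges[i] and edges[i+1]; all indices are in range (edges has n_br+1 elements), so getD is exact here
def splitBrRows (y h : Int) (edges : List Int) (n_br : Nat) : List (Int × Int × Int × Int) :=
  (List.range n_br).map (fun i => (edges.getD i 0, y, edges.getD (i+1) 0 - edges.getD i 0, h))

def split_br (bounding_rect : Int × Int × Int × Int) (splits : List Int) : List (Int × Int × Int × Int) :=
  let (x, y, w, h) := bounding_rect
  let n_br := splits.length + 1
  let edges := [x] ++ splits.map (fun split => split + x) ++ [x + w]
  splitBrRows y h edges n_br

-- ===== PORT B =====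
def splitBrGo (x y h stop : Int) (prev : Int) : List Int → List (Int × Int × Int × Int)
  | [] => [(prev, y, stop - prev, h)]
  | split :: rest => (prev, y, (split + x) - prev, h) :: splitBrGo x y h stop (split + x) rest

def split_br_alt (bounding_rect : Int × Int × Int × Int) (splits : List Int) : List (Int × Int × Int × Int) :=
  let (x, y, w, h) := bounding_rect
  splitBrGo x y h (x + w) x splits

-- ===== PRECONDITION & SPEC =====
def Spec_split_br (bounding_rect : Int × Int × Int × Int) (splits : List Int) (out : List (Int × Int × Int × Int)) : Prop := out = split_br_alt bounding_rect splits
instance (bounding_rect : Int × Int × Int × Int) (splits : List Int) (out : List (Int × Int × Int × Int)) : Decidable (Spec_split_br bounding_rect splits out) := by unfold Spec_split_br; infer_instance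

-- ===== CLAIM (what is proved, stated in full; the proofs are below) =====
def Claim_equal_split_br : Prop := ∀ (bounding_rect : Int × Int × Int × Int) (splits : List Int), Dom_split_br bounding_rect splits → Spec_split_br bounding_rect splits (split_br bounding_rect splits)

-- ===== LEMMAS AND PROOFS =====
-- pairs of consecutive edges, written B-style over an explicit middle list of edges
def splitBrEdgesGo (y h : Int) (prev : Int) (stop : Int) : List Int → List (Int × Int × Int × Int)
  | [] => [(prev, y, stop - prev, h)]
  | e :: es => (prev, y, e - prev, h) :: splitBrEdgesGo y h e stop es

theorem splitBrRows_eq_edgesGo (y h : Int) :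
    ∀ (mid : List Int) (prev stop : Int),
      splitBrRows y h (prev :: (mid ++ [stop])) (mid.length + 1) = splitBrEdgesGo y h prev stop mid := by
  intro mid
  induction mid with
  | nil => intro prev stop; simp [splitBrRows, splitBrEdgesGo, List.range_succ]
  | cons e es ih =>
      intro prev stop
      have h1 : splitBrRows y h (prev :: ((e :: es) ++ [stop])) ((e :: es).length + 1)
          = (prev, y, e - prev, h) :: splitBrRows y h (e :: (es ++ [stop])) (es.length + 1) := by
        simp [splitBrRows, List.range_succ_eq_map, List.map_map, Function.comp]
      rw [h1, ih e stop]
      rfl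

theorem splitBrGo_eq_edgesGo (x y h stop : Int) :
    ∀ (splits : List Int) (prev : Int),
      splitBrGo x y h stop prev splits = splitBrEdgesGo y h prev stop (splits.map (fun s => s + x)) := by
  intro splits
  induction splits with
  | nil => intro prev; rfl
  | cons s rest ih => intro prev; simp [splitBrGo, splitBrEdgesGo, ih]

-- ===== VERDICT (by name: the statement is the Claim_ definition above) =====
theorem split_br_spec : Claim_equal_split_br := by
  intro bounding_rect splits _
  obtain ⟨x, y, w, h⟩ := bounding_rect
  show split_br (x, y, w, h) splits = split_br_alt (x, y, w, h) splits
  show splitBrRows y h ([x] ++ splits.map (fun split => split + x) ++ [x + w]) (splits.length + 1)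
      = splitBrGo x y h (x + w) x splits
  rw [splitBrGo_eq_edgesGo]
  have := splitBrRows_eq_edgesGo y h (splits.map (fun s => s + x)) x (x + w)
  simpa using this
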